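-- pv_equiv track=rewrite | github.com/leezear2022/boundflow | boundflow/ir/liveness.py | shape_numel
-- ===== SOURCE A (Python) =====
-- from typing import Any, Callable, Dict, Iterable, List, Optional, Sequence, Tuple
--
-- def shape_numel(shape: Sequence[Optional[int]]) -> Optional[int]:
--     n = 1
--     for d in shape:
--         if d is None:
--             return None
--         if int(d) < 0:
--             return None
--         n *= int(d)
--     return int(n)
-- ===== SOURCE B (Python) =====
-- def shape_numel(shape):
--     # Divide-and-conquer: recursively split the shape in halves; each half
--     # yields None (invalid dim) or its product, and halves are combined by *.
--     xs = list(shape)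
--     if not xs:
--         return 1
--     if len(xs) == 1:
--         d = xs[0]
--         if d is None:
--             return None
--         v = int(d)
--         if v < 0:
--             return None
--         return v
--     mid = len(xs) // 2
--     left = shape_numel(xs[:mid])
--     if left is None:
--         return None
--     right = shape_numel(xs[mid:])
--     if right is None:
--         return None
--     return left * right
-- ===== Notes on version B (the rewrite author's own statement) =====
-- stated objective: alternative
-- what changed: Replaces A's single left-to-right accumulating loop with early returns by a recursive divide-and-conquer that splits the shape in halves and multiplies the halves' sub-products (None propagating up).
import Mathlib
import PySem

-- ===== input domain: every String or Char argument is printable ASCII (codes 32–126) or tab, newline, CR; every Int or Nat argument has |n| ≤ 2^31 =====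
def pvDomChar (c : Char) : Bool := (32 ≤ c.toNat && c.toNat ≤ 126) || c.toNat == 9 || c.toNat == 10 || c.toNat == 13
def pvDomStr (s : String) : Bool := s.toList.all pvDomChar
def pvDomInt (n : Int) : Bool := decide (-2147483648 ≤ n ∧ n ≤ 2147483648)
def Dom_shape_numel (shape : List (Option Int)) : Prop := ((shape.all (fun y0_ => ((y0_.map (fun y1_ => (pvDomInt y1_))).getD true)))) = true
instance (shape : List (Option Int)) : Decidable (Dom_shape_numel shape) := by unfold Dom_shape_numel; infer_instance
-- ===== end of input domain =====

-- B replaces A's single accumulating loop by a recursive divide-and-conquer over halves of the shape; same values, no speed claim.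


-- ===== PORT A =====
-- A's loop with accumulator n and early returns, as structural recursion.
def shape_numel_go (n : Int) : List (Option Int) → Option Int
  | [] => some n
  | none :: _ => none
  | some v :: rest => if v < 0 then none else shape_numel_go (n * v) rest

def shape_numel (shape : List (Option Int)) : Option Int := shape_numel_go 1 shape

-- ===== PORT B =====
-- divide and conquer: split the list in halves, combine sub-products, None propagates
def shape_numel_alt (shape : List (Option Int)) : Option Int :=
  match shape with
  | [] => some 1
  | [d] =>
    match d with
    | none => none
    | some v => if v < 0 then none else some v
  | x :: y :: rest =>
    let xs := x :: y :: rest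
    let mid := xs.length / 2
    match shape_numel_alt (xs.take mid) with
    | none => none
    | some l =>
      match shape_numel_alt (xs.drop mid) with
      | none => none
      | some r => some (l * r)
termination_by shape.length
decreasing_by
  · simp; omega
  · simp; omega

-- ===== PRECONDITION & SPEC =====
def Spec_shape_numel (shape : List (Option Int)) (out : Option Int) : Prop := out = shape_numel_alt shape
instance (shape : List (Option Int)) (out : Option Int) : Decidable (Spec_shape_numel shape out) := by unfold Spec_shape_numel; infer_instance

-- ===== CLAIM (what is proved, stated in full; the proofs are below) =====
def Claim_equal_shape_numel : Prop := ∀ (shape : List (Option Int)), Dom_shape_numel shape → Spec_shape_numel shape (shape_numel shape)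

-- ===== LEMMAS AND PROOFS =====
-- common normal form of both ports
def pvBad (d : Option Int) : Bool := d.isNone || decide (d.getD 0 < 0)

def pvSpecVal (xs : List (Option Int)) : Option Int :=
  if xs.any pvBad then none else some ((xs.map (fun d => d.getD 0)).prod)

theorem shape_numel_go_eq (shape : List (Option Int)) : ∀ (n : Int),
    shape_numel_go n shape =
      if shape.any pvBad then none
      else some (n * (shape.map (fun d => d.getD 0)).prod) := by
  induction shape with
  | nil => intro n; simp [shape_numel_go, pvBad]
  | cons d rest ih =>
    intro n
    cases d with
    | none => simp [shape_numel_go, pvBad]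
    | some v =>
      by_cases h : v < 0
      · simp [shape_numel_go, h, pvBad]
      · simp [shape_numel_go, h, ih, pvBad, mul_assoc]

theorem pvSpecVal_append (a b : List (Option Int)) :
    pvSpecVal (a ++ b) =
      match pvSpecVal a with
      | none => none
      | some l => match pvSpecVal b with
        | none => none
        | some r => some (l * r) := by
  by_cases ha : a.any pvBad <;> by_cases hb : b.any pvBad <;>
    simp [pvSpecVal, ha, hb, List.any_append]

theorem shape_numel_alt_eq (shape : List (Option Int)) :
    shape_numel_alt shape = pvSpecVal shape := by
  induction hn : shape.length using Nat.strong_induction_on generalizing shape with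
  | _ n ih =>
    match shape with
    | [] => simp [shape_numel_alt, pvSpecVal]
    | [d] =>
      cases d with
      | none => simp [shape_numel_alt, pvSpecVal, pvBad]
      | some v =>
        by_cases h : v < 0 <;> simp [shape_numel_alt, pvSpecVal, pvBad, h]
    | x :: y :: rest =>
      rw [shape_numel_alt]
      have hlen : (x :: y :: rest).length = n := hn
      have h2 : 2 ≤ n := by simp at hlen; omega
      have ht : ((x :: y :: rest).take (n / 2)).length < n := by
        simp [hlen]; omega
      have hd : ((x :: y :: rest).drop (n / 2)).length < n := by
        simp [hlen]; omega
      rw [hlen]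
      rw [ih _ ht _ rfl, ih _ hd _ rfl]
      have := pvSpecVal_append ((x :: y :: rest).take (n / 2)) ((x :: y :: rest).drop (n / 2))
      rw [List.take_append_drop] at this
      rw [this]

-- ===== VERDICT (by name: the statement is the Claim_ definition above) =====
theorem shape_numel_spec : Claim_equal_shape_numel := by
  intro shape _
  unfold Spec_shape_numel
  rw [shape_numel_alt_eq]
  unfold shape_numel
  rw [shape_numel_go_eq]
  simp [pvSpecVal]
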